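-- pv_equiv track=rewrite | github.com/JUiscoming/algorithm | baekjoon/greedy/주유소.py | solution
-- ===== SOURCE A (Python) =====
-- def solution(N, lengths, prices):
--     stop = [(0, prices[0])]
--     st = 0
--
--     # 1. 멈출 지점 구하기
--     while st < N-1:
--         end = st+1
--         while end < N-1:
--             if prices[st] > prices[end]:
--                 stop.append((end, prices[end]))
--                 break
--             else:
--                 end += 1
--         st = end
--     # 2. 가격 계산
--     answer = 0
--     for i in range(len(stop)):
--         idx_st, price_st = stop[i]
--         if i+1 == len(stop):
--             idx_end = N
--         else:
--             idx_end = stop[i+1][0]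
--         answer += price_st * sum(lengths[idx_st: idx_end])
--
--     return answer
-- ===== SOURCE B (Python) =====
-- def solution(N, lengths, prices):
--     # One running-minimum pass: price paid on segment i is the cheapest price seen so far.
--     answer = 0
--     m = prices[0]
--     for i, L in enumerate(lengths[:N]):
--         if i < N - 1:
--             m = min(m, prices[i])
--         answer += m * L
--     return answer
-- ===== Notes on version B (the rewrite author's own statement) =====
-- stated objective: simpler
-- what changed: B drops A's stop-point table and segment slicing entirely and computes the answer in one left-to-right pass, keeping a running minimum price and adding min_so_far * length for each segment.
import Mathlib
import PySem

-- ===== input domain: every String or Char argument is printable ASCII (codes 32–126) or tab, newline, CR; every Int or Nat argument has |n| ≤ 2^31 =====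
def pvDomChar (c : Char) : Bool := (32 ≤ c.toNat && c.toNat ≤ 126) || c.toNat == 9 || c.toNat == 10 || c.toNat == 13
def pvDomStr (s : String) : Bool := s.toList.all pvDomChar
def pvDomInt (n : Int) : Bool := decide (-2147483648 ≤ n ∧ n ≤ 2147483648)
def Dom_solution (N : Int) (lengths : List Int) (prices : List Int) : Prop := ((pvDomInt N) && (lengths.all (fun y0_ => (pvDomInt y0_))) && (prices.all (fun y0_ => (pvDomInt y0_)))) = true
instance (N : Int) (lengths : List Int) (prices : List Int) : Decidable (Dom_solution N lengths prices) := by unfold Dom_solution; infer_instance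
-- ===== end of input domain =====

-- B replaces A's stop-point table and segment slicing by a single running-minimum pass
-- over the lengths (objective: simpler); equivalence is about the return value only.

-- ===== PORT A =====
-- inner `while end < N-1` scan: returns the final value of `end`.
-- fuel = (N-1-e).toNat at every call site, enough for the loop to finish (totality guard only)
def innerScan (prices : List Int) (N pst : Int) : Nat → Int → Int
  | 0, e => e
  | fuel + 1, e =>
      if e < N - 1 then
        if pst > PySem.List.pyGetD prices e 0 then e
        else innerScan prices N pst fuel (e + 1)
      else e

-- outer `while st < N-1` loop, appending to the stop list (fuel = (N-1-st).toNat at call sites)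
def outerLoop (prices : List Int) (N : Int) : Nat → Int → List (Int × Int) → List (Int × Int)
  | 0, _, stop => stop
  | fuel + 1, st, stop =>
      if st < N - 1 then
        let e := innerScan prices N (PySem.List.pyGetD prices st 0) (N - 1 - (st + 1)).toNat (st + 1)
        outerLoop prices N fuel e
          (if e < N - 1 then stop ++ [(e, PySem.List.pyGetD prices e 0)] else stop)
      else stop

-- phase 2: `for i in range(len(stop))`, slicing lengths between consecutive stops
def sumStops (N : Int) (lengths : List Int) : List (Int × Int) → Int
  | [] => 0
  | [(i, p)] => p * (PySem.List.slice lengths (some i) (some N)).sum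
  | (i, p) :: (j, q) :: rest =>
      p * (PySem.List.slice lengths (some i) (some j)).sum + sumStops N lengths ((j, q) :: rest)

def solution (N : Int) (lengths : List Int) (prices : List Int) : Int :=
  sumStops N lengths (outerLoop prices N (N - 1 - 0).toNat 0 [(0, PySem.List.pyGetD prices 0 0)])

-- ===== PORT B =====
-- the `for i, L in enumerate(lengths[:N])` loop carrying (answer, min_price)
def bLoop (N : Int) (prices : List Int) : List (Int × Int) → Int → Int → Int
  | [], acc, _ => acc
  | (i, L) :: rest, acc, m =>
      let m' := if i < N - 1 then min m (PySem.List.pyGetD prices i 0) else m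
      bLoop N prices rest (acc + m' * L) m'

def solution_alt (N : Int) (lengths : List Int) (prices : List Int) : Int :=
  bLoop N prices
    (PySem.List.enumerate (PySem.List.slice lengths (some 0) (some N)) 0)
    0 (PySem.List.pyGetD prices 0 0)

-- ===== PRECONDITION & SPEC =====
-- Pre_ excludes exactly the inputs on which Python A raises: prices == [] (prices[0])
-- or len(prices) < N-1 (the scan reads every prices[end], end < N-1: IndexError).
def Pre_solution (N : Int) (lengths : List Int) (prices : List Int) : Prop :=
  prices ≠ [] ∧ N - 1 ≤ (prices.length : Int)
instance (N : Int) (lengths : List Int) (prices : List Int) : Decidable (Pre_solution N lengths prices) := by unfold Pre_solution; infer_instance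
def pvWitness_solution : Int × List Int × List Int := (3, [2, 4], [5, 2, 1])

def Spec_solution (N : Int) (lengths : List Int) (prices : List Int) (out : Int) : Prop := out = solution_alt N lengths prices
instance (N : Int) (lengths : List Int) (prices : List Int) (out : Int) : Decidable (Spec_solution N lengths prices out) := by unfold Spec_solution; infer_instance

-- ===== CLAIM (what is proved, stated in full; the proofs are below) =====
def Claim_equal_solution : Prop := ∀ (N : Int) (lengths : List Int) (prices : List Int), Dom_solution N lengths prices → Pre_solution N lengths prices → Spec_solution N lengths prices (solution N lengths prices)

-- ===== LEMMAS AND PROOFS =====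

-- abbreviations used throughout the proofs
-- P i = prices[i] (defaulted), ls = lengths[:N]

theorem innerScan_ge (prices : List Int) (N pst : Int) :
    ∀ (fuel : Nat) (e : Int), e ≤ innerScan prices N pst fuel e := by
  intro fuel
  induction fuel with
  | zero => intro e; simp [innerScan]
  | succ fuel ih =>
      intro e
      simp only [innerScan]
      split_ifs with h1 h2
      · exact le_rfl
      · exact le_trans (by omega) (ih (e + 1))
      · exact le_rfl

theorem innerScan_le (prices : List Int) (N pst : Int) :
    ∀ (fuel : Nat) (e : Int), e ≤ N - 1 → innerScan prices N pst fuel e ≤ N - 1 := by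
  intro fuel
  induction fuel with
  | zero => intro e h; simpa [innerScan] using h
  | succ fuel ih =>
      intro e h
      simp only [innerScan]
      split_ifs with h1 h2
      · omega
      · exact ih (e + 1) (by omega)
      · omega

theorem innerScan_mid (prices : List Int) (N pst : Int) :
    ∀ (fuel : Nat) (e j : Int), e ≤ j → j < innerScan prices N pst fuel e →
      pst ≤ PySem.List.pyGetD prices j 0 := by
  intro fuel
  induction fuel with
  | zero => intro e j h1 h2; simp [innerScan] at h2; omega
  | succ fuel ih =>
      intro e j h1 h2
      simp only [innerScan] at h2
      split_ifs at h2 with hlt hbr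
      · omega
      · rcases eq_or_lt_of_le h1 with rfl | h1'
        · omega
        · exact ih (e + 1) j (by omega) h2
      · omega

theorem innerScan_break (prices : List Int) (N pst : Int) :
    ∀ (fuel : Nat) (e : Int), (N - 1 - e).toNat ≤ fuel →
      innerScan prices N pst fuel e < N - 1 →
      pst > PySem.List.pyGetD prices (innerScan prices N pst fuel e) 0 := by
  intro fuel
  induction fuel with
  | zero => intro e hf h; simp only [innerScan] at h ⊢; omega
  | succ fuel ih =>
      intro e hf h
      simp only [innerScan] at h ⊢
      split_ifs at h ⊢ with hlt hbr
      · exact hbr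
      · exact ih (e + 1) (by omega) h
      · omega

theorem outerLoop_acc (prices : List Int) (N : Int) :
    ∀ (fuel : Nat) (st : Int) (acc : List (Int × Int)),
      outerLoop prices N fuel st acc = acc ++ outerLoop prices N fuel st [] := by
  intro fuel
  induction fuel with
  | zero => intro st acc; simp [outerLoop]
  | succ fuel ih =>
      intro st acc
      simp only [outerLoop]
      set e := innerScan prices N (PySem.List.pyGetD prices st 0) (N - 1 - (st + 1)).toNat (st + 1)
      split_ifs with hst he
      · rw [ih e (acc ++ [(e, PySem.List.pyGetD prices e 0)]),
            ih e ([] ++ [(e, PySem.List.pyGetD prices e 0)])]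
        simp
      · exact ih e acc
      · simp

theorem bLoop_acc (N : Int) (prices : List Int) :
    ∀ (l : List (Int × Int)) (acc m : Int),
      bLoop N prices l acc m = acc + bLoop N prices l 0 m := by
  intro l
  induction l with
  | nil => intro acc m; simp [bLoop]
  | cons p rest ih =>
      intro acc m
      obtain ⟨i, L⟩ := p
      simp only [bLoop]
      rw [ih, ih (0 + _)]
      ring

-- running B's loop from a start index where no further minimum update happens
theorem bLoop_const (N : Int) (prices : List Int) :
    ∀ (l : List Int) (s m : Int), N - 1 ≤ s →
      bLoop N prices (PySem.List.enumerate l s) 0 m = m * l.sum := by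
  intro l
  induction l with
  | nil => intro s m _; simp [PySem.List.enumerate_nil, bLoop]
  | cons L rest ih =>
      intro s m hs
      rw [PySem.List.enumerate_cons]
      simp only [bLoop, if_neg (by omega : ¬ s < N - 1)]
      rw [bLoop_acc, ih (s + 1) m (by omega)]
      simp [List.sum_cons]; ring

-- B's tail sum from index i over ls (the quantity A's segments are matched against)
def Bsum (N : Int) (prices ls : List Int) (i m : Int) : Int :=
  bLoop N prices (PySem.List.enumerate (ls.drop i.toNat) i) 0 m

theorem Bsum_empty (N : Int) (prices ls : List Int) (i m : Int)
    (h : ls.length ≤ i.toNat) : Bsum N prices ls i m = 0 := by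
  unfold Bsum
  rw [List.drop_eq_nil_of_le h]
  simp [PySem.List.enumerate_nil, bLoop]

theorem Bsum_step (N : Int) (prices ls : List Int) (i m : Int) (hi : 0 ≤ i)
    (hK : i.toNat < ls.length) :
    Bsum N prices ls i m =
      (if i < N - 1 then min m (PySem.List.pyGetD prices i 0) else m) * ls[i.toNat] +
      Bsum N prices ls (i + 1) (if i < N - 1 then min m (PySem.List.pyGetD prices i 0) else m) := by
  unfold Bsum
  rw [List.drop_eq_getElem_cons hK, PySem.List.enumerate_cons]
  simp only [bLoop]
  rw [bLoop_acc]
  have h1 : (i + 1).toNat = i.toNat + 1 := by omega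
  rw [h1]
  ring

theorem Bsum_lower (N : Int) (prices ls : List Int) (i m : Int) (hi : 0 ≤ i)
    (hlt : i < N - 1) (hm : PySem.List.pyGetD prices i 0 ≤ m) :
    Bsum N prices ls i m = Bsum N prices ls i (PySem.List.pyGetD prices i 0) := by
  by_cases hK : i.toNat < ls.length
  · rw [Bsum_step N prices ls i m hi hK, Bsum_step N prices ls i _ hi hK]
    rw [if_pos hlt, if_pos hlt, min_eq_right hm, min_self]
  · rw [Bsum_empty N prices ls i m (by omega), Bsum_empty N prices ls i _ (by omega)]

-- a maximal segment on which the running minimum stays pst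
theorem Bsum_seg (N : Int) (prices ls : List Int) :
    ∀ (k : Nat) (i e pst : Int), 0 ≤ i → i + (k : Int) = e → e ≤ N - 1 →
      (∀ j, i ≤ j → j < e → pst ≤ PySem.List.pyGetD prices j 0) →
      Bsum N prices ls i pst = pst * ((ls.drop i.toNat).take k).sum + Bsum N prices ls e pst := by
  intro k
  induction k with
  | zero =>
      intro i e pst _ he _ _
      have : e = i := by omega
      subst this
      simp
  | succ k ih =>
      intro i e pst hi he hN hall
      by_cases hK : i.toNat < ls.length
      · rw [Bsum_step N prices ls i pst hi hK]
        rw [if_pos (by omega : i < N - 1),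
            min_eq_left (hall i le_rfl (by omega))]
        rw [ih (i + 1) e pst (by omega) (by omega) hN
            (fun j h1 h2 => hall j (by omega) h2)]
        rw [List.drop_eq_getElem_cons hK, List.take_succ_cons, List.sum_cons]
        have h1 : (i + 1).toNat = i.toNat + 1 := by omega
        rw [h1]
        ring
      · rw [Bsum_empty N prices ls i pst (by omega),
            Bsum_empty N prices ls e pst (by omega),
            List.drop_eq_nil_of_le (by omega)]
        simp

-- A's slices, re-expressed over ls = lengths[:N]
theorem slice_eq_drop_take (lengths : List Int) (N a b : Int)
    (ha : 0 ≤ a) (hab : a ≤ b) (hbN : b ≤ N) :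
    PySem.List.slice lengths (some a) (some b) =
      ((PySem.List.slice lengths (some 0) (some N)).drop a.toNat).take (b.toNat - a.toNat) := by
  rw [PySem.List.slice_toNat lengths (a := a) (b := b) ha (by omega),
      PySem.List.slice_toNat lengths (a := 0) (b := N) le_rfl (by omega)]
  simp only [Int.toNat_zero, List.drop_zero, Nat.sub_zero]
  rw [List.drop_take, List.take_take]
  congr 1
  omega

theorem slice_eq_drop (lengths : List Int) (N a : Int) (ha : 0 ≤ a) (haN : a ≤ N) :
    PySem.List.slice lengths (some a) (some N) =
      (PySem.List.slice lengths (some 0) (some N)).drop a.toNat := by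
  rw [slice_eq_drop_take lengths N a N ha haN le_rfl]
  apply List.take_of_length_le
  rw [List.length_drop, PySem.List.slice_toNat lengths (a := 0) (b := N) le_rfl (by omega)]
  simp
  omega

-- running B's loop from an index at or past N-1: the minimum never changes
theorem Bsum_const_tail (N : Int) (prices ls : List Int) (i m : Int) (_hi : 0 ≤ i)
    (h : N - 1 ≤ i) : Bsum N prices ls i m = m * (ls.drop i.toNat).sum := by
  unfold Bsum
  exact bLoop_const N prices (ls.drop i.toNat) i m h

-- main invariant: from any stop st with current stop price prices[st] ≤ m,
-- A's remaining stop-table sum equals B's remaining running-minimum sum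
theorem main_inv (N : Int) (lengths prices : List Int) :
    ∀ (fuel : Nat) (st m : Int), 0 ≤ st → st < N - 1 → (N - 1 - st).toNat ≤ fuel →
      PySem.List.pyGetD prices st 0 ≤ m →
      sumStops N lengths ((st, PySem.List.pyGetD prices st 0) :: outerLoop prices N fuel st []) =
        Bsum N prices (PySem.List.slice lengths (some 0) (some N)) st m := by
  intro fuel
  induction fuel with
  | zero => intro st m h1 h2 h3 _; omega
  | succ fuel ih =>
      intro st m hst hstN hfuel hm
      simp only [outerLoop, if_pos hstN]
      set ls := PySem.List.slice lengths (some 0) (some N) with hls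
      set e := innerScan prices N (PySem.List.pyGetD prices st 0) (N - 1 - (st + 1)).toNat (st + 1) with he
      have hge : st + 1 ≤ e := innerScan_ge prices N (PySem.List.pyGetD prices st 0) _ (st + 1)
      have hle : e ≤ N - 1 := innerScan_le prices N (PySem.List.pyGetD prices st 0) _ (st + 1) (by omega)
      have hmid : ∀ j, st ≤ j → j < e →
          PySem.List.pyGetD prices st 0 ≤ PySem.List.pyGetD prices j 0 := by
        intro j h1 h2
        rcases eq_or_lt_of_le h1 with rfl | h1'
        · exact le_rfl
        · exact innerScan_mid prices N (PySem.List.pyGetD prices st 0) _ (st + 1) j (by omega) h2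
      -- B side: lower m to prices[st], then run the segment st..e at that constant price
      rw [Bsum_lower N prices ls st m hst hstN hm]
      have hseg := Bsum_seg N prices ls (e - st).toNat st e (PySem.List.pyGetD prices st 0)
        hst (by omega) hle hmid
      by_cases hbr : e < N - 1
      · -- a new stop at e
        rw [if_pos hbr, outerLoop_acc]
        have hPe : PySem.List.pyGetD prices e 0 < PySem.List.pyGetD prices st 0 :=
          innerScan_break prices N (PySem.List.pyGetD prices st 0) _ (st + 1) (by omega) hbr
        have hrec := ih e (PySem.List.pyGetD prices st 0) (by omega) hbr (by omega) (le_of_lt hPe)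
        simp only [List.nil_append, List.singleton_append, sumStops] at hrec ⊢
        rw [hrec, hseg, slice_eq_drop_take lengths N st e hst (by omega) (by omega), ← hls]
        have hnt : e.toNat - st.toNat = (e - st).toNat := by omega
        rw [hnt]
      · -- inner scan ran to N-1: no new stop, last segment extends to N
        have houter : outerLoop prices N fuel e [] = [] := by
          cases fuel with
          | zero => simp [outerLoop]
          | succ fuel => simp [outerLoop, if_neg hbr]
        rw [if_neg hbr, houter]
        simp only [sumStops]
        rw [hseg, Bsum_const_tail N prices ls e (PySem.List.pyGetD prices st 0) (by omega) (by omega),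
            slice_eq_drop lengths N st hst (by omega), ← hls]
        have hsplit : ls.drop st.toNat =
            ((ls.drop st.toNat).take (e - st).toNat) ++ (ls.drop e.toNat) := by
          conv_lhs => rw [← List.take_append_drop (e - st).toNat (ls.drop st.toNat)]
          rw [List.drop_drop]
          congr 2
          omega
        have hsum : (ls.drop st.toNat).sum =
            ((ls.drop st.toNat).take (e - st).toNat).sum + (ls.drop e.toNat).sum := by
          conv_lhs => rw [hsplit]
          rw [List.sum_append]
        rw [hsum]
        ring

-- ===== VERDICT (by name: the statement is the Claim_ definition above) =====
theorem solution_spec : Claim_equal_solution := by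
  intro N lengths prices _ _
  unfold Spec_solution solution solution_alt
  rw [outerLoop_acc]
  by_cases h2 : (0 : Int) < N - 1
  · have hmain := main_inv N lengths prices (N - 1 - 0).toNat 0 (PySem.List.pyGetD prices 0 0)
      le_rfl h2 le_rfl le_rfl
    rw [List.singleton_append, hmain]
    unfold Bsum
    norm_num
  · have houter : outerLoop prices N (N - 1 - 0).toNat 0 [] = [] := by
      cases hN : (N - 1 - 0).toNat with
      | zero => simp [outerLoop]
      | succ fuel => exact absurd hN (by omega)
    rw [List.singleton_append, houter]
    simp only [sumStops]
    rw [bLoop_const N prices _ 0 _ (by omega)]
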